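-- pv_equiv track=rewrite | github.com/projeto-de-algoritmos-2025/Grafos2-Resolved_Problems | Questions/Hard/1591_Strange_Printer_2.py | isPrintable
-- ===== SOURCE A (Python) =====
-- from typing import List
-- from collections import defaultdict, deque
--
-- def isPrintable(targetGrid: List[List[int]]) -> bool:
--     rows, cols = len(targetGrid), len(targetGrid[0])
--     color_bounds = {}
--
--     for i in range(rows):
--         for j in range(cols):
--             color = targetGrid[i][j]
--             if color not in color_bounds:
--                 color_bounds[color] = [i, j, i, j]
--             else:
--                 color_bounds[color][0] = min(color_bounds[color][0], i)
--                 color_bounds[color][1] = min(color_bounds[color][1], j)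
--                 color_bounds[color][2] = max(color_bounds[color][2], i)
--                 color_bounds[color][3] = max(color_bounds[color][3], j)
--
--     graph = defaultdict(set)
--     indegree = defaultdict(int)
--
--     for color, (r1, c1, r2, c2) in color_bounds.items():
--         for i in range(r1, r2 + 1):
--             for j in range(c1, c2 + 1):
--                 inner_color = targetGrid[i][j]
--                 if inner_color != color and inner_color not in graph[color]:
--                     graph[color].add(inner_color)
--                     indegree[inner_color] += 1
--
--     all_colors = set(color_bounds.keys())
--     queue = deque([c for c in all_colors if indegree[c] == 0])
--     printed = 0
--
--     while queue:
--         current = queue.popleft()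
--         printed += 1
--         for neighbor in graph[current]:
--             indegree[neighbor] -= 1
--             if indegree[neighbor] == 0:
--                 queue.append(neighbor)
--
--     return printed == len(all_colors)
-- ===== SOURCE B (Python) =====
-- from typing import List
--
--
-- def isPrintable(targetGrid: List[List[int]]) -> bool:
--     rows, cols = len(targetGrid), len(targetGrid[0])
--
--     occ = {}
--     for i in range(rows):
--         for j in range(cols):
--             occ.setdefault(targetGrid[i][j], []).append((i, j))
--
--     bounds = {c: (min(p[0] for p in ps), min(p[1] for p in ps),
--                   max(p[0] for p in ps), max(p[1] for p in ps))
--               for c, ps in occ.items()}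
--
--     erased = set()
--     while True:
--         # a not-yet-erased color e is "blocked" if some other un-erased
--         # color's bounding box still contains a cell of color e
--         blocked = set()
--         for d, (r1, c1, r2, c2) in bounds.items():
--             if d in erased:
--                 continue
--             for i in range(r1, r2 + 1):
--                 for j in range(c1, c2 + 1):
--                     e = targetGrid[i][j]
--                     if e != d:
--                         blocked.add(e)
--         newly = [c for c in bounds if c not in erased and c not in blocked]
--         if not newly:
--             return len(erased) == len(bounds)
--         erased.update(newly)
-- ===== Notes on version B (the rewrite author's own statement) =====
-- stated objective: alternative
-- what changed: Replaces A's explicit dependency graph + indegree Kahn topological sort by repeated elimination passes that erase any color no longer blocked by an un-erased color's bounding box (no graph, no indegree counters, no queue); bounding boxes are computed from per-color occurrence lists via min/max instead of incremental updates.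
import Mathlib
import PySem

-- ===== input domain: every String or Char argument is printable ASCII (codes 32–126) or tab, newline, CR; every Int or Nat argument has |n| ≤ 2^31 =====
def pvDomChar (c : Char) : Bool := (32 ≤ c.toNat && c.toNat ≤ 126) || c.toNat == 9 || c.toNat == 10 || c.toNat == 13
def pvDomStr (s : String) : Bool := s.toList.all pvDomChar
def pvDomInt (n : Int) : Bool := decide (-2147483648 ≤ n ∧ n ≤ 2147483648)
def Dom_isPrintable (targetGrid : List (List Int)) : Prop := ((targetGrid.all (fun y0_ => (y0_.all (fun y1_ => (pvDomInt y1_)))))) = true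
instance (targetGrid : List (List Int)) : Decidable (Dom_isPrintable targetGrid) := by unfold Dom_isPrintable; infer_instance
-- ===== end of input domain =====

-- B replaces A's explicit dependency graph + indegree topological sort by repeated
-- elimination passes over bounding boxes (no graph, no queue); objective: alternative.

-- ===== PORT A =====

-- targetGrid[i][j]; exact under Pre_ (everywhere used, the indices are in range)
def pvCell (g : List (List Int)) (i j : Int) : Int :=
  PySem.List.pyGetD (PySem.List.pyGetD g i []) j 0

-- the first nested loop of A: color -> [min row, min col, max row, max col]
def pvBoundsA (g : List (List Int)) : PySem.Dict Int (Int × Int × Int × Int) :=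
  (PySem.List.pyRange 0 (PySem.List.len g) 1).foldl (fun b i =>
    (PySem.List.pyRange 0 (PySem.List.len (g.headD [])) 1).foldl (fun b j =>
      b.insert (pvCell g i j)
        (match b.get? (pvCell g i j) with
         | none => (i, j, i, j)
         | some (r1, c1, r2, c2) => (min r1 i, min c1 j, max r2 i, max c2 j))) b)
    PySem.Dict.empty

-- A's second loop: build graph (defaultdict(set)) and indegree (defaultdict(int))
def pvBuildGI (g : List (List Int)) (items : List (Int × (Int × Int × Int × Int))) :
    PySem.Dict Int (PySem.Set Int) × PySem.Dict Int Int :=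
  items.foldl (fun gi p =>
    (PySem.List.pyRange p.2.1 (p.2.2.2.1 + 1) 1).foldl (fun gi i =>
      (PySem.List.pyRange p.2.2.1 (p.2.2.2.2 + 1) 1).foldl (fun gi j =>
        let inner := pvCell g i j
        let s := gi.1.getD p.1 PySem.Set.empty
        if inner != p.1 && !(PySem.Set.contains s inner) then
          (gi.1.insert p.1 (PySem.Set.add s inner), gi.2.modify inner 0 (· + 1))
        else
          (gi.1.insert p.1 s, gi.2)) gi) gi)
    (PySem.Dict.empty, PySem.Dict.empty)

-- A's while loop (Kahn); fuel = number of colors suffices: each color is enqueued at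
-- most once (proved below), so the fuel guard is never reached
def pvKahn (graph : PySem.Dict Int (PySem.Set Int)) :
    Nat → List Int → PySem.Dict Int Int → Int → Int
  | _, [], _, printed => printed
  | 0, _ :: _, _, printed => printed
  | fuel + 1, current :: rest, indeg, printed =>
    let step := (graph.getD current PySem.Set.empty).foldl
      (fun (qi : List Int × PySem.Dict Int Int) n =>
        let ind' := qi.2.modify n 0 (· - 1)
        if ind'.getD n 0 == 0 then (qi.1 ++ [n], ind') else (qi.1, ind'))
      (rest, indeg)
    pvKahn graph fuel step.1 step.2 (printed + 1)

def isPrintable (targetGrid : List (List Int)) : Bool :=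
  let bounds := pvBoundsA targetGrid
  let gi := pvBuildGI targetGrid bounds.items
  let allColors : PySem.Set Int := PySem.Set.ofList bounds.keys
  let queue := allColors.filter (fun c => gi.2.getD c 0 == 0)
  let printed := pvKahn gi.1 allColors.length queue gi.2 0
  printed == PySem.Set.len allColors

-- ===== PORT B =====

-- color -> list of its occurrence positions (dict + setdefault/append)
def pvOccB (g : List (List Int)) : PySem.Dict Int (List (Int × Int)) :=
  (PySem.List.pyRange 0 (PySem.List.len g) 1).foldl (fun d i =>
    (PySem.List.pyRange 0 (PySem.List.len (g.headD [])) 1).foldl (fun d j =>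
      d.modify (pvCell g i j) [] (· ++ [(i, j)])) d)
    PySem.Dict.empty

-- (min(p[0]..), min(p[1]..), max(p[0]..), max(p[1]..)); the .getD 0 is never used:
-- occurrence lists are nonempty (Python's min/max on a nonempty generator)
def pvCombo (ps : List (Int × Int)) : Int × Int × Int × Int :=
  ((PySem.List.min? (ps.map Prod.fst) (fun x => x)).getD 0,
   (PySem.List.min? (ps.map Prod.snd) (fun x => x)).getD 0,
   (PySem.List.max? (ps.map Prod.fst) (fun x => x)).getD 0,
   (PySem.List.max? (ps.map Prod.snd) (fun x => x)).getD 0)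

def pvBoundsB (g : List (List Int)) : PySem.Dict Int (Int × Int × Int × Int) :=
  (pvOccB g).items.foldl (fun b p => b.insert p.1 (pvCombo p.2)) PySem.Dict.empty

-- one pass: the set of colors still blocked by some un-erased color's bounding box
def pvBlocked (g : List (List Int)) (items : List (Int × (Int × Int × Int × Int)))
    (erased : PySem.Set Int) : PySem.Set Int :=
  items.foldl (fun bl p =>
    if PySem.Set.contains erased p.1 then bl
    else (PySem.List.pyRange p.2.1 (p.2.2.2.1 + 1) 1).foldl (fun bl i =>
      (PySem.List.pyRange p.2.2.1 (p.2.2.2.2 + 1) 1).foldl (fun bl j =>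
        let e := pvCell g i j
        if e != p.1 then PySem.Set.add bl e else bl) bl) bl)
    PySem.Set.empty

-- B's while-True loop; fuel = #colors + 1 suffices: every pass that does not return
-- erases at least one more color (proved below), so the fuel guard is never reached
def pvElim (g : List (List Int)) (bounds : PySem.Dict Int (Int × Int × Int × Int)) :
    Nat → PySem.Set Int → Bool
  | 0, erased => PySem.Set.len erased == (bounds.size : Int)
  | fuel + 1, erased =>
    let blocked := pvBlocked g bounds.items erased
    let newly := bounds.keys.filter
      (fun c => !(PySem.Set.contains erased c) && !(PySem.Set.contains blocked c))
    if newly.isEmpty then PySem.Set.len erased == (bounds.size : Int)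
    else pvElim g bounds fuel (PySem.Set.update erased newly)

def isPrintable_alt (targetGrid : List (List Int)) : Bool :=
  let bounds := pvBoundsB targetGrid
  pvElim targetGrid bounds (bounds.size + 1) PySem.Set.empty

-- ===== PRECONDITION & SPEC =====

-- Excludes exactly the inputs on which the Python A raises IndexError: the empty grid
-- (len(targetGrid[0])) and grids with a row shorter than the first row (targetGrid[i][j]).
def Pre_isPrintable (targetGrid : List (List Int)) : Prop :=
  targetGrid ≠ [] ∧ ∀ row ∈ targetGrid, (targetGrid.headD []).length ≤ row.length

instance (targetGrid : List (List Int)) : Decidable (Pre_isPrintable targetGrid) := by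
  unfold Pre_isPrintable; infer_instance

def pvWitness_isPrintable : List (List Int) := [[1, 2], [1, 1]]

def Spec_isPrintable (targetGrid : List (List Int)) (out : Bool) : Prop :=
  out = isPrintable_alt targetGrid
instance (targetGrid : List (List Int)) (out : Bool) : Decidable (Spec_isPrintable targetGrid out) := by
  unfold Spec_isPrintable; infer_instance

-- ===== CLAIM (what is proved, stated in full; the proofs are below) =====
def Claim_equal_isPrintable : Prop := ∀ (targetGrid : List (List Int)), Dom_isPrintable targetGrid → Pre_isPrintable targetGrid → Spec_isPrintable targetGrid (isPrintable targetGrid)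

-- ===== LEMMAS AND PROOFS =====

-- proof-layer vocabulary ------------------------------------------------------

def pvPts (g : List (List Int)) : List (Int × Int) :=
  (PySem.List.pyRange 0 (PySem.List.len g) 1).flatMap (fun i =>
    (PySem.List.pyRange 0 (PySem.List.len (g.headD [])) 1).map (fun j => (i, j)))

def pvColors (g : List (List Int)) : List Int :=
  (pvPts g).map (fun p => pvCell g p.1 p.2)

def pvOccOf (g : List (List Int)) (c : Int) : List (Int × Int) :=
  (pvPts g).filter (fun p => pvCell g p.1 p.2 == c)

def pvRegion (g : List (List Int)) (bb : Int × Int × Int × Int) : List Int :=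
  (PySem.List.pyRange bb.1 (bb.2.2.1 + 1) 1).flatMap (fun i =>
    (PySem.List.pyRange bb.2.1 (bb.2.2.2 + 1) 1).map (fun j => pvCell g i j))

def pvOut (g : List (List Int)) (d : Int) : List Int :=
  (pvRegion g ((pvBoundsA g).getD d (0, 0, 0, 0))).filter (fun e => e != d)

def pvK (g : List (List Int)) : List Int := (pvBoundsA g).keys

def pvE (g : List (List Int)) (d c : Int) : Prop := d ∈ pvK g ∧ c ∈ pvOut g d

inductive pvAcc (g : List (List Int)) : Int → Prop
  | mk (c : Int) (h : ∀ d, pvE g d c → pvAcc g d) : pvAcc g c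

-- generic fold plumbing -------------------------------------------------------

theorem pvFoldlFlatMap {α β γ : Type} (l : List α) (f : α → List β) (step : γ → β → γ)
    (init : γ) : (l.flatMap f).foldl step init = l.foldl (fun acc a => (f a).foldl step acc) init := by
  induction l generalizing init with
  | nil => rfl
  | cons a t ih => simp [List.flatMap_cons, List.foldl_append, ih]

-- port A characterization -----------------------------------------------------

theorem pvBoundsA_eq_flat (g : List (List Int)) :
    pvBoundsA g = (pvPts g).foldl (fun b p =>
      b.insert (pvCell g p.1 p.2)
        (match b.get? (pvCell g p.1 p.2) with
         | none => (p.1, p.2, p.1, p.2)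
         | some (r1, c1, r2, c2) => (min r1 p.1, min c1 p.2, max r2 p.1, max c2 p.2)))
      PySem.Dict.empty := by
  unfold pvBoundsA pvPts
  rw [pvFoldlFlatMap]
  simp only [List.foldl_map]

theorem pvBoundsA_keys (g : List (List Int)) :
    (pvBoundsA g).keys = PySem.Set.ofList (pvColors g) := by
  rw [pvBoundsA_eq_flat]
  rw [PySem.Dict.keys_foldl_insert_key (key := fun p : Int × Int => pvCell g p.1 p.2)]
  simp [pvColors, PySem.Set.update_nil_left]

theorem pvBoundsA_nodup (g : List (List Int)) : (pvBoundsA g).keys.Nodup := by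
  rw [pvBoundsA_keys]; exact PySem.Set.nodup_ofList _

theorem pvCombo_single (p : Int × Int) : pvCombo [p] = (p.1, p.2, p.1, p.2) := by
  simp [pvCombo, PySem.List.min?_id_cons, PySem.List.max?_id_cons]

theorem pvCombo_append (ps : List (Int × Int)) (p : Int × Int) (h : ps ≠ []) :
    pvCombo (ps ++ [p]) = (min (pvCombo ps).1 p.1, min (pvCombo ps).2.1 p.2,
      max (pvCombo ps).2.2.1 p.1, max (pvCombo ps).2.2.2 p.2) := by
  obtain ⟨q, t, rfl⟩ := List.exists_cons_of_ne_nil h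
  simp [pvCombo, PySem.List.min?_id_cons, PySem.List.max?_id_cons, List.foldl_append]

theorem pvBoundsA_get? (g : List (List Int)) (c : Int) :
    (pvBoundsA g).get? c = if pvOccOf g c = [] then none else some (pvCombo (pvOccOf g c)) := by
  rw [pvBoundsA_eq_flat]
  unfold pvOccOf
  induction (pvPts g) using List.reverseRecOn with
  | nil => simp
  | append_singleton pts p ih =>
    rw [List.foldl_append]
    by_cases hc : pvCell g p.1 p.2 = c
    · subst hc
      rw [List.foldl_cons, List.foldl_nil, PySem.Dict.get?_insert_self, ih, List.filter_append]
      have hfp : List.filter (fun q => pvCell g q.1 q.2 == pvCell g p.1 p.2) [p] = [p] := by simp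
      rw [hfp]
      by_cases hnil : List.filter (fun q => pvCell g q.1 q.2 == pvCell g p.1 p.2) pts = []
      · simp [hnil, pvCombo_single]
      · rw [if_neg hnil, if_neg (by simp)]
        have hca := pvCombo_append _ p hnil
        rcases hv : pvCombo (List.filter (fun q => pvCell g q.1 q.2 == pvCell g p.1 p.2) pts)
          with ⟨a, b, d, e⟩
        rw [hv] at hca
        simp [hca]
    · rw [List.foldl_cons, List.foldl_nil]
      rw [PySem.Dict.get?_insert_of_ne _ _ (fun h => hc h.symm)]
      rw [List.filter_append]
      simp only [List.filter_cons, List.filter_nil, beq_iff_eq, if_neg hc, List.append_nil]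
      exact ih

theorem pvOccB_eq_flat (g : List (List Int)) :
    pvOccB g = (pvPts g).foldl (fun d p => d.modify (pvCell g p.1 p.2) [] (· ++ [p]))
      PySem.Dict.empty := by
  unfold pvOccB pvPts
  rw [pvFoldlFlatMap]
  simp only [List.foldl_map]

theorem pvOccB_keys (g : List (List Int)) :
    (pvOccB g).keys = PySem.Set.ofList (pvColors g) := by
  rw [pvOccB_eq_flat]
  rw [PySem.Dict.keys_foldl_modify_key (key := fun p : Int × Int => pvCell g p.1 p.2)]
  simp [pvColors, PySem.Set.update_nil_left]

theorem pvOccB_nodup (g : List (List Int)) : (pvOccB g).keys.Nodup := by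
  rw [pvOccB_keys]; exact PySem.Set.nodup_ofList _

theorem pvOccB_getD (g : List (List Int)) (c : Int) :
    (pvOccB g).getD c [] = pvOccOf g c := by
  rw [pvOccB_eq_flat]
  have h : (pvPts g).foldl (fun d p => d.modify (pvCell g p.1 p.2) [] (· ++ [p]))
        PySem.Dict.empty
      = ((pvPts g).map (fun p => (pvCell g p.1 p.2, p))).foldl
          (fun d q => d.modify q.1 [] (· ++ [q.2])) PySem.Dict.empty := by
    rw [List.foldl_map]
  rw [h, PySem.Dict.getD_foldl_modify_append]
  simp [pvOccOf, List.filter_map, Function.comp_def]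

theorem pvMem_colors_iff (g : List (List Int)) (c : Int) :
    c ∈ pvColors g ↔ pvOccOf g c ≠ [] := by
  simp only [pvColors, pvOccOf, List.mem_map, ne_eq, List.filter_eq_nil_iff]
  push_neg
  simp only [beq_iff_eq]

theorem pvBoundsB_items (g : List (List Int)) :
    (pvBoundsB g).items = (pvOccB g).items.map (fun q => (q.1, pvCombo q.2)) := by
  unfold pvBoundsB
  rw [PySem.Dict.items_foldl_insert_fresh (pvOccB g).items Prod.fst (fun q => pvCombo q.2)
    PySem.Dict.empty (by intro a _; simp) (by simpa [PySem.Dict.keys] using pvOccB_nodup g)]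
  simp [PySem.Dict.empty]

theorem pvBoundsB_keys (g : List (List Int)) : (pvBoundsB g).keys = (pvBoundsA g).keys := by
  have h1 : (pvBoundsB g).keys = (pvOccB g).keys := by
    simp [PySem.Dict.keys, pvBoundsB_items, List.map_map, Function.comp_def]
  rw [h1, pvOccB_keys, pvBoundsA_keys]

theorem pvBoundsB_nodup (g : List (List Int)) : (pvBoundsB g).keys.Nodup := by
  rw [pvBoundsB_keys]; exact pvBoundsA_nodup g

theorem pvBoundsA_getD (g : List (List Int)) (c : Int) (hc : c ∈ (pvBoundsA g).keys) :
    (pvBoundsA g).getD c (0, 0, 0, 0) = pvCombo (pvOccOf g c) := by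
  have hmem : c ∈ pvColors g := by
    rw [pvBoundsA_keys] at hc; exact (PySem.Set.mem_ofList _ _).1 hc
  have hne := (pvMem_colors_iff g c).1 hmem
  have h := pvBoundsA_get? g c
  rw [if_neg hne] at h
  exact PySem.Dict.getD_of_get?_eq_some _ _ h

theorem pvBoundsB_getD (g : List (List Int)) (c : Int) (hc : c ∈ (pvBoundsA g).keys) :
    (pvBoundsB g).getD c (0, 0, 0, 0) = pvCombo (pvOccOf g c) := by
  have hcB : c ∈ (pvOccB g).keys := by
    rw [pvOccB_keys, ← pvBoundsA_keys]; exact hc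
  obtain ⟨v, hv⟩ : ∃ v, (pvOccB g).get? c = some v := by
    cases h : (pvOccB g).get? c with
    | none => exact absurd ((PySem.Dict.get?_eq_none_iff_not_mem_keys _ _).1 h) (by simp [hcB])
    | some v => exact ⟨v, rfl⟩
  have hvv : v = pvOccOf g c := by
    rw [← pvOccB_getD g c, PySem.Dict.getD_eq_get?_getD, hv]; rfl
  have hmemB : (c, pvCombo (pvOccOf g c)) ∈ (pvBoundsB g).items := by
    rw [pvBoundsB_items]
    exact List.mem_map.2 ⟨(c, v), PySem.Dict.mem_items_of_get?_eq_some _ hv, by simp [hvv]⟩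
  exact PySem.Dict.getD_of_mem_items _ hmemB (pvBoundsB_nodup g) _

theorem pvBoundsB_eq (g : List (List Int)) : pvBoundsB g = pvBoundsA g := by
  apply PySem.Dict.ext
  rw [PySem.Dict.items_eq_map_keys _ (pvBoundsB_nodup g) (0, 0, 0, 0),
      PySem.Dict.items_eq_map_keys _ (pvBoundsA_nodup g) (0, 0, 0, 0), pvBoundsB_keys]
  apply List.map_congr_left
  intro k hk
  rw [pvBoundsB_getD g k hk, pvBoundsA_getD g k hk]

-- membership in pvK -----------------------------------------------------------

theorem pvMem_pts (g : List (List Int)) (p : Int × Int) :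
    p ∈ pvPts g ↔ (0 ≤ p.1 ∧ p.1 < PySem.List.len g) ∧
      (0 ≤ p.2 ∧ p.2 < PySem.List.len (g.headD [])) := by
  rcases p with ⟨i, j⟩
  simp only [pvPts, List.mem_flatMap, List.mem_map, PySem.List.mem_pyRange_one,
    Prod.mk.injEq]
  constructor
  · rintro ⟨a, ha, b, hb, rfl, rfl⟩; exact ⟨ha, hb⟩
  · rintro ⟨ha, hb⟩; exact ⟨i, ha, j, hb, rfl, rfl⟩

theorem pvMem_K (g : List (List Int)) (c : Int) : c ∈ pvK g ↔ c ∈ pvColors g := by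
  unfold pvK
  rw [pvBoundsA_keys]
  exact PySem.Set.mem_ofList _ _

theorem pvComboBounds (g : List (List Int)) (d : Int) (h : pvOccOf g d ≠ []) :
    (0 ≤ (pvCombo (pvOccOf g d)).1 ∧ (pvCombo (pvOccOf g d)).2.2.1 < PySem.List.len g) ∧
    (0 ≤ (pvCombo (pvOccOf g d)).2.1 ∧
      (pvCombo (pvOccOf g d)).2.2.2 < PySem.List.len (g.headD [])) := by
  have hfst : (pvOccOf g d).map Prod.fst ≠ [] := by simpa using h
  have hsnd : (pvOccOf g d).map Prod.snd ≠ [] := by simpa using h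
  have hocc : ∀ q ∈ pvOccOf g d, (0 ≤ q.1 ∧ q.1 < PySem.List.len g) ∧
      (0 ≤ q.2 ∧ q.2 < PySem.List.len (g.headD [])) := by
    intro q hq
    exact (pvMem_pts g q).1 (List.mem_filter.1 hq).1
  refine ⟨⟨?_, ?_⟩, ?_, ?_⟩
  · cases hm : PySem.List.min? ((pvOccOf g d).map Prod.fst) (fun x => x) with
    | none => exact absurd ((PySem.List.min?_eq_none_iff _ _).1 hm) hfst
    | some m =>
      obtain ⟨q, hq, hqm⟩ := List.mem_map.1 (PySem.List.min?_mem hm)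
      simp only [pvCombo, hm, Option.getD_some]
      exact hqm ▸ (hocc q hq).1.1
  · cases hm : PySem.List.max? ((pvOccOf g d).map Prod.fst) (fun x => x) with
    | none => exact absurd ((PySem.List.max?_eq_none_iff _ _).1 hm) hfst
    | some m =>
      obtain ⟨q, hq, hqm⟩ := List.mem_map.1 (PySem.List.max?_mem hm)
      simp only [pvCombo, hm, Option.getD_some]
      exact hqm ▸ (hocc q hq).1.2
  · cases hm : PySem.List.min? ((pvOccOf g d).map Prod.snd) (fun x => x) with
    | none => exact absurd ((PySem.List.min?_eq_none_iff _ _).1 hm) hsnd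
    | some m =>
      obtain ⟨q, hq, hqm⟩ := List.mem_map.1 (PySem.List.min?_mem hm)
      simp only [pvCombo, hm, Option.getD_some]
      exact hqm ▸ (hocc q hq).2.1
  · cases hm : PySem.List.max? ((pvOccOf g d).map Prod.snd) (fun x => x) with
    | none => exact absurd ((PySem.List.max?_eq_none_iff _ _).1 hm) hsnd
    | some m =>
      obtain ⟨q, hq, hqm⟩ := List.mem_map.1 (PySem.List.max?_mem hm)
      simp only [pvCombo, hm, Option.getD_some]
      exact hqm ▸ (hocc q hq).2.2

-- every color inside a key's bounding box is itself a key
theorem pvRegion_sub_colors (g : List (List Int)) (d : Int) (hd : d ∈ pvK g) :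
    ∀ c ∈ pvRegion g ((pvBoundsA g).getD d (0, 0, 0, 0)), c ∈ pvColors g := by
  intro c hc
  have hocc : pvOccOf g d ≠ [] := (pvMem_colors_iff g d).1 ((pvMem_K g d).1 hd)
  rw [pvBoundsA_getD g d hd] at hc
  unfold pvRegion at hc
  obtain ⟨i, hi, hj⟩ := List.mem_flatMap.1 hc
  obtain ⟨j, hjr, rfl⟩ := List.mem_map.1 hj
  rw [PySem.List.mem_pyRange_one] at hi hjr
  obtain ⟨⟨h1, h2⟩, h3, h4⟩ := pvComboBounds g d hocc
  refine List.mem_map.2 ⟨(i, j), (pvMem_pts g (i, j)).2 ⟨⟨by omega, by omega⟩, by omega, by omega⟩, rfl⟩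

theorem pvOut_sub_K (g : List (List Int)) (d c : Int) (hd : d ∈ pvK g)
    (hc : c ∈ pvOut g d) : c ∈ pvK g := by
  rw [pvMem_K]
  exact pvRegion_sub_colors g d hd c (List.mem_filter.1 hc).1

theorem pvOut_ne (g : List (List Int)) (d c : Int) (hc : c ∈ pvOut g d) : c ≠ d := by
  have := (List.mem_filter.1 hc).2
  simpa using this

-- graph / indegree characterization -------------------------------------------

theorem pvBuildGI_eq_flat (g : List (List Int))
    (items : List (Int × (Int × Int × Int × Int))) :
    pvBuildGI g items = items.foldl (fun gi p =>
      (pvRegion g p.2).foldl (fun gi e =>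
        let s := gi.1.getD p.1 PySem.Set.empty
        if e != p.1 && !(PySem.Set.contains s e) then
          (gi.1.insert p.1 (PySem.Set.add s e), gi.2.modify e 0 (· + 1))
        else
          (gi.1.insert p.1 s, gi.2)) gi)
      (PySem.Dict.empty, PySem.Dict.empty) := by
  unfold pvBuildGI pvRegion
  congr 1
  funext gi p
  rw [pvFoldlFlatMap]
  simp only [List.foldl_map]

theorem pvInner (g : List (List Int)) (d : Int) (cs : List Int) :
    ∀ (G : PySem.Dict Int (PySem.Set Int)) (I : PySem.Dict Int Int),
    (∀ k, k ≠ d → (cs.foldl (fun gi e =>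
        let s := gi.1.getD d PySem.Set.empty
        if e != d && !(PySem.Set.contains s e) then
          (gi.1.insert d (PySem.Set.add s e), gi.2.modify e 0 (· + 1))
        else
          (gi.1.insert d s, gi.2)) (G, I)).1.get? k = G.get? k)
    ∧ (cs.foldl (fun gi e =>
        let s := gi.1.getD d PySem.Set.empty
        if e != d && !(PySem.Set.contains s e) then
          (gi.1.insert d (PySem.Set.add s e), gi.2.modify e 0 (· + 1))
        else
          (gi.1.insert d s, gi.2)) (G, I)).1.getD d PySem.Set.empty
        = PySem.Set.update (G.getD d PySem.Set.empty) (cs.filter (· != d))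
    ∧ ∀ c, (cs.foldl (fun gi e =>
        let s := gi.1.getD d PySem.Set.empty
        if e != d && !(PySem.Set.contains s e) then
          (gi.1.insert d (PySem.Set.add s e), gi.2.modify e 0 (· + 1))
        else
          (gi.1.insert d s, gi.2)) (G, I)).2.getD c 0
        = I.getD c 0 + (if c ∈ PySem.Set.update (G.getD d PySem.Set.empty) (cs.filter (· != d))
            ∧ c ∉ G.getD d PySem.Set.empty then 1 else 0) := by
  induction cs with
  | nil =>
    intro G I
    refine ⟨fun k _ => rfl, by simp [PySem.Set.update_nil], fun c => ?_⟩
    rw [if_neg (fun h => h.2 (by simpa [PySem.Set.update_nil] using h.1))]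
    simp
  | cons e cs ih =>
    intro G I
    rw [List.foldl_cons]
    by_cases he : e = d
    · -- e == d: else-branch, filter drops e
      have hcond : (e != d && !(PySem.Set.contains (G.getD d PySem.Set.empty) e)) = false := by
        simp [he]
      simp only [hcond, Bool.false_eq_true, if_false]
      obtain ⟨ih1, ih2, ih3⟩ := ih (G.insert d (G.getD d PySem.Set.empty)) I
      have hG1 : (G.insert d (G.getD d PySem.Set.empty)).getD d PySem.Set.empty
          = G.getD d PySem.Set.empty := PySem.Dict.getD_insert_self _ _ _ _
      have hfil : (e :: cs).filter (· != d) = cs.filter (· != d) := by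
        simp [he]
      refine ⟨fun k hk => ?_, ?_, fun c => ?_⟩
      · rw [ih1 k hk, PySem.Dict.get?_insert_of_ne _ _ hk]
      · rw [ih2, hG1, hfil]
      · rw [ih3 c, hG1, hfil]
    · by_cases hs : e ∈ G.getD d PySem.Set.empty
      · -- already recorded: else-branch, add would be a no-op
        have hcond : (e != d && !(PySem.Set.contains (G.getD d PySem.Set.empty) e)) = false := by
          have hct : PySem.Set.contains (G.getD d PySem.Set.empty) e = true := by
            rw [PySem.Set.contains_iff]; exact hs
          simp only [hct, Bool.not_true, Bool.and_false]
        simp only [hcond, Bool.false_eq_true, if_false]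
        obtain ⟨ih1, ih2, ih3⟩ := ih (G.insert d (G.getD d PySem.Set.empty)) I
        have hG1 : (G.insert d (G.getD d PySem.Set.empty)).getD d PySem.Set.empty
            = G.getD d PySem.Set.empty := PySem.Dict.getD_insert_self _ _ _ _
        have hfil : PySem.Set.update (G.getD d PySem.Set.empty) ((e :: cs).filter (· != d))
            = PySem.Set.update (G.getD d PySem.Set.empty) (cs.filter (· != d)) := by
          rw [List.filter_cons, if_pos (by simpa using he), PySem.Set.update_cons,
            PySem.Set.add_of_mem hs]
        refine ⟨fun k hk => ?_, ?_, fun c => ?_⟩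
        · rw [ih1 k hk, PySem.Dict.get?_insert_of_ne _ _ hk]
        · rw [ih2, hG1, hfil]
        · rw [ih3 c, hG1, hfil]
      · -- new foreign color: then-branch
        have hcond : (e != d && !(PySem.Set.contains (G.getD d PySem.Set.empty) e)) = true := by
          have hcf : PySem.Set.contains (G.getD d PySem.Set.empty) e = false := by
            cases hcc : PySem.Set.contains (G.getD d PySem.Set.empty) e with
            | false => rfl
            | true => exact absurd (by rw [PySem.Set.contains_iff] at hcc; exact hcc) hs
          simp only [hcf, Bool.not_false, Bool.and_true, bne_iff_ne, ne_eq]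
          exact he
        simp only [hcond, if_true]
        obtain ⟨ih1, ih2, ih3⟩ :=
          ih (G.insert d (PySem.Set.add (G.getD d PySem.Set.empty) e)) (I.modify e 0 (· + 1))
        have hG1 : (G.insert d (PySem.Set.add (G.getD d PySem.Set.empty) e)).getD d
            PySem.Set.empty = PySem.Set.add (G.getD d PySem.Set.empty) e :=
          PySem.Dict.getD_insert_self _ _ _ _
        have hfil : PySem.Set.update (G.getD d PySem.Set.empty) ((e :: cs).filter (· != d))
            = PySem.Set.update (PySem.Set.add (G.getD d PySem.Set.empty) e)
                (cs.filter (· != d)) := by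
          rw [List.filter_cons, if_pos (by simpa using he), PySem.Set.update_cons]
        refine ⟨fun k hk => ?_, ?_, fun c => ?_⟩
        · rw [ih1 k hk, PySem.Dict.get?_insert_of_ne _ _ hk]
        · rw [ih2, hG1, hfil]
        · rw [ih3 c, hG1, hfil]
          have hMod : (I.modify e 0 (· + 1)).getD c 0 =
              if c = e then I.getD e 0 + 1 else I.getD c 0 := by
            by_cases hce : c = e
            · subst hce; rw [PySem.Dict.getD_modify_self]; simp
            · rw [PySem.Dict.getD_modify_of_ne _ _ _ hce]; simp [hce]
          rw [hMod]
          by_cases hce : c = e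
          · subst hce
            have h2 : c ∈ PySem.Set.add (G.getD d PySem.Set.empty) c := by
              rw [PySem.Set.mem_add]; exact Or.inr rfl
            have h1 : c ∈ PySem.Set.update (PySem.Set.add (G.getD d PySem.Set.empty) c)
                (cs.filter (· != d)) := by
              rw [PySem.Set.mem_update]; exact Or.inl h2
            rw [if_pos rfl, if_neg (fun h => h.2 h2), if_pos ⟨h1, hs⟩]
            ring
          · rw [if_neg hce]
            have hmem : c ∈ PySem.Set.add (G.getD d PySem.Set.empty) e ↔
                c ∈ G.getD d PySem.Set.empty := by
              rw [PySem.Set.mem_add]; simp [hce]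
            congr 1
            exact if_congr (and_congr Iff.rfl (not_congr hmem)) rfl rfl


theorem pvFilterMapLen {α β : Type} (l : List α) (f : α → β) (q : β → Bool) :
    ((l.map f).filter q).length = (l.filter (fun a => q (f a))).length := by
  induction l with
  | nil => rfl
  | cons a t ih => by_cases h : q (f a) <;> simp [h, ih]

theorem pvOuter (g : List (List Int)) :
    ∀ (its : List (Int × (Int × Int × Int × Int))) (G : PySem.Dict Int (PySem.Set Int))
      (I : PySem.Dict Int Int),
    (its.map Prod.fst).Nodup →
    (∀ p ∈ its, G.get? p.1 = none) →
    (∀ p ∈ its, (its.foldl (fun gi p =>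
        (pvRegion g p.2).foldl (fun gi e =>
          let s := gi.1.getD p.1 PySem.Set.empty
          if e != p.1 && !(PySem.Set.contains s e) then
            (gi.1.insert p.1 (PySem.Set.add s e), gi.2.modify e 0 (· + 1))
          else
            (gi.1.insert p.1 s, gi.2)) gi) (G, I)).1.getD p.1 PySem.Set.empty
        = PySem.Set.ofList ((pvRegion g p.2).filter (· != p.1)))
    ∧ (∀ k, k ∉ its.map Prod.fst → (its.foldl (fun gi p =>
        (pvRegion g p.2).foldl (fun gi e =>
          let s := gi.1.getD p.1 PySem.Set.empty
          if e != p.1 && !(PySem.Set.contains s e) then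
            (gi.1.insert p.1 (PySem.Set.add s e), gi.2.modify e 0 (· + 1))
          else
            (gi.1.insert p.1 s, gi.2)) gi) (G, I)).1.get? k = G.get? k)
    ∧ (∀ c, (its.foldl (fun gi p =>
        (pvRegion g p.2).foldl (fun gi e =>
          let s := gi.1.getD p.1 PySem.Set.empty
          if e != p.1 && !(PySem.Set.contains s e) then
            (gi.1.insert p.1 (PySem.Set.add s e), gi.2.modify e 0 (· + 1))
          else
            (gi.1.insert p.1 s, gi.2)) gi) (G, I)).2.getD c 0
        = I.getD c 0 + ((its.filter
            (fun p => decide (c ∈ (pvRegion g p.2).filter (· != p.1)))).length : Int)) := by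
  intro its
  induction its with
  | nil =>
    intro G I _ _
    exact ⟨fun p hp => absurd hp (by simp), fun k _ => rfl, fun c => by simp⟩
  | cons p t ih =>
    intro G I hnd hfresh
    have hmap : ((p :: t).map Prod.fst) = p.1 :: t.map Prod.fst := rfl
    rw [hmap] at hnd
    have hpd : p.1 ∉ t.map Prod.fst := (List.nodup_cons.1 hnd).1
    have htnd : (t.map Prod.fst).Nodup := (List.nodup_cons.1 hnd).2
    obtain ⟨i1, i2, i3⟩ := pvInner g p.1 (pvRegion g p.2) G I
    have hGp : G.getD p.1 PySem.Set.empty = PySem.Set.empty := by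
      rw [PySem.Dict.getD_eq_get?_getD, hfresh p List.mem_cons_self]; rfl
    rw [List.foldl_cons]
    set r := (pvRegion g p.2).foldl (fun gi e =>
          let s := gi.1.getD p.1 PySem.Set.empty
          if e != p.1 && !(PySem.Set.contains s e) then
            (gi.1.insert p.1 (PySem.Set.add s e), gi.2.modify e 0 (· + 1))
          else
            (gi.1.insert p.1 s, gi.2)) (G, I) with hr
    obtain ⟨j1, j2, j3⟩ := ih r.1 r.2 htnd (by
      intro q hq
      have hqp : q.1 ≠ p.1 := by
        intro hqq; exact hpd (List.mem_map.2 ⟨q, hq, hqq⟩)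
      rw [i1 q.1 hqp]
      exact hfresh q (List.mem_cons_of_mem _ hq))
    have hval : r.1.getD p.1 PySem.Set.empty
        = PySem.Set.ofList ((pvRegion g p.2).filter (· != p.1)) := by
      rw [i2, hGp]
      exact PySem.Set.update_empty _
    refine ⟨?_, ?_, ?_⟩
    · intro q hq
      rcases List.mem_cons.1 hq with hq | hq
      · subst hq
        have := j2 q.1 hpd
        rw [PySem.Dict.getD_eq_get?_getD, this, ← PySem.Dict.getD_eq_get?_getD]
        exact hval
      · exact j1 q hq
    · intro k hk
      have hk1 : k ∉ t.map Prod.fst := fun h => hk (by simp [h])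
      have hk2 : k ≠ p.1 := fun h => hk (by simp [h])
      rw [j2 k hk1, i1 k hk2]
    · intro c
      rw [j3 c, i3 c, hGp]
      have hcond : (c ∈ PySem.Set.update PySem.Set.empty
            ((pvRegion g p.2).filter (· != p.1)) ∧ c ∉ PySem.Set.empty)
          ↔ c ∈ (pvRegion g p.2).filter (· != p.1) := by
        rw [PySem.Set.update_empty]
        constructor
        · rintro ⟨h1, _⟩; exact (PySem.Set.mem_ofList _ _).1 h1
        · intro h; exact ⟨(PySem.Set.mem_ofList _ _).2 h, fun hh => List.not_mem_nil hh⟩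
      rw [List.filter_cons]
      by_cases hc : c ∈ (pvRegion g p.2).filter (· != p.1)
      · rw [if_pos (hcond.2 hc), if_pos (by simpa using hc)]
        simp only [List.length_cons]
        push_cast
        ring
      · rw [if_neg (fun h => hc (hcond.1 h)), if_neg (by simpa using hc)]
        ring

theorem pvGraph_getD (g : List (List Int)) (c : Int) :
    (pvBuildGI g (pvBoundsA g).items).1.getD c PySem.Set.empty =
      if c ∈ pvK g then PySem.Set.ofList (pvOut g c) else PySem.Set.empty := by
  rw [pvBuildGI_eq_flat]
  have hnd : ((pvBoundsA g).items.map Prod.fst).Nodup := by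
    simpa [PySem.Dict.keys] using pvBoundsA_nodup g
  obtain ⟨o1, o2, _⟩ := pvOuter g (pvBoundsA g).items PySem.Dict.empty PySem.Dict.empty hnd
    (fun p _ => PySem.Dict.get?_empty _)
  by_cases hc : c ∈ pvK g
  · rw [if_pos hc]
    have hc' : c ∈ (pvBoundsA g).items.map Prod.fst := by
      have hkk : pvK g = (pvBoundsA g).items.map Prod.fst := by simp [pvK, PySem.Dict.keys]
      rwa [hkk] at hc
    obtain ⟨p, hp, hp1⟩ := List.mem_map.1 hc'
    have hbb : (pvBoundsA g).getD p.1 (0, 0, 0, 0) = p.2 := by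
      rcases p with ⟨k, v⟩
      exact PySem.Dict.getD_of_mem_items _ hp (pvBoundsA_nodup g) _
    have := o1 p hp
    rw [hp1] at this
    rw [this]
    unfold pvOut
    rw [← hp1, hbb]
  · rw [if_neg hc]
    have hck : c ∉ (pvBoundsA g).items.map Prod.fst := by
      intro h; exact hc (by simpa [pvK, PySem.Dict.keys] using h)
    rw [PySem.Dict.getD_eq_get?_getD, o2 c hck, PySem.Dict.get?_empty]; rfl

theorem pvIndeg_getD (g : List (List Int)) (c : Int) :
    (pvBuildGI g (pvBoundsA g).items).2.getD c 0 =
      (((pvK g).filter (fun d => decide (c ∈ pvOut g d))).length : Int) := by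
  rw [pvBuildGI_eq_flat]
  have hnd : ((pvBoundsA g).items.map Prod.fst).Nodup := by
    simpa [PySem.Dict.keys] using pvBoundsA_nodup g
  obtain ⟨_, _, o3⟩ := pvOuter g (pvBoundsA g).items PySem.Dict.empty PySem.Dict.empty hnd
    (fun p _ => PySem.Dict.get?_empty _)
  rw [o3 c, PySem.Dict.getD_empty]
  have hcongr : (pvBoundsA g).items.filter
        (fun p => decide (c ∈ (pvRegion g p.2).filter (· != p.1)))
      = (pvBoundsA g).items.filter (fun p => decide (c ∈ pvOut g p.1)) := by
    apply List.filter_congr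
    intro p hp
    have hbb : (pvBoundsA g).getD p.1 (0, 0, 0, 0) = p.2 := by
      rcases p with ⟨k, v⟩
      exact PySem.Dict.getD_of_mem_items _ hp (pvBoundsA_nodup g) _
    unfold pvOut
    rw [hbb]
  rw [hcongr]
  have hlen := pvFilterMapLen (pvBoundsA g).items Prod.fst
    (fun d => decide (c ∈ pvOut g d))
  have hkeys : pvK g = (pvBoundsA g).items.map Prod.fst := by
    simp [pvK, PySem.Dict.keys]
  rw [hkeys, hlen]
  norm_num

-- Kahn loop --------------------------------------------------------------------

-- effect of the inner decrement fold, as a pair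
theorem pvKahnStepPair (nbrs : List Int) (hnd : nbrs.Nodup) (q : List Int)
    (I : PySem.Dict Int Int) :
    (nbrs.foldl (fun (qi : List Int × PySem.Dict Int Int) n =>
        let ind' := qi.2.modify n 0 (· - 1)
        if ind'.getD n 0 == 0 then (qi.1 ++ [n], ind') else (qi.1, ind')) (q, I))
      = (q ++ nbrs.filter (fun n => I.getD n 0 == 1),
         nbrs.foldl (fun (J : PySem.Dict Int Int) n => J.modify n 0 (· - 1)) I) := by
  induction nbrs generalizing q I with
  | nil => simp
  | cons n ns ih =>
    have hn : n ∉ ns := (List.nodup_cons.1 hnd).1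
    have hnd' : ns.Nodup := (List.nodup_cons.1 hnd).2
    have hself : (I.modify n 0 (· - 1)).getD n 0 = I.getD n 0 - 1 :=
      PySem.Dict.getD_modify_self _ _ _ _
    have hfil : ns.filter (fun m => (I.modify n 0 (· - 1)).getD m 0 == 1)
        = ns.filter (fun m => I.getD m 0 == 1) := by
      apply List.filter_congr
      intro m hm
      rw [PySem.Dict.getD_modify_of_ne _ _ _ (fun hh : m = n => hn (hh ▸ hm))]
    rw [List.foldl_cons]
    by_cases hb : I.getD n 0 = 1
    · have hcond : ((I.modify n 0 (· - 1)).getD n 0 == 0) = true := by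
        rw [hself, hb]; rfl
      simp only [hcond, if_true]
      rw [ih hnd' (q ++ [n]) (I.modify n 0 (· - 1)), hfil]
      rw [List.filter_cons, if_pos (by simpa using hb)]
      simp
    · have hcond : ((I.modify n 0 (· - 1)).getD n 0 == 0) = false := by
        rw [hself]
        simp only [beq_eq_false_iff_ne, ne_eq]
        omega
      simp only [hcond, Bool.false_eq_true, if_false]
      rw [ih hnd' q (I.modify n 0 (· - 1)), hfil]
      rw [List.filter_cons, if_neg (by simpa using hb), List.foldl_cons]

theorem pvDecFold (nbrs : List Int) (hnd : nbrs.Nodup) (I : PySem.Dict Int Int) (c : Int) :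
    (nbrs.foldl (fun (J : PySem.Dict Int Int) n => J.modify n 0 (· - 1)) I).getD c 0
      = I.getD c 0 - (if c ∈ nbrs then 1 else 0) := by
  induction nbrs generalizing I with
  | nil => simp
  | cons n ns ih =>
    have hn : n ∉ ns := (List.nodup_cons.1 hnd).1
    have hnd' : ns.Nodup := (List.nodup_cons.1 hnd).2
    rw [List.foldl_cons, ih hnd']
    by_cases hc : c = n
    · subst hc
      rw [PySem.Dict.getD_modify_self]
      rw [if_neg (fun h => hn h), if_pos (List.mem_cons_self)]
      ring
    · rw [PySem.Dict.getD_modify_of_ne _ _ _ hc]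
      by_cases hcm : c ∈ ns
      · rw [if_pos hcm, if_pos (List.mem_cons_of_mem _ hcm)]
      · rw [if_neg hcm, if_neg (by simp [hc, hcm])]

theorem pvKahnStepQ1 (nbrs : List Int) (hnd : nbrs.Nodup) (q : List Int)
    (I : PySem.Dict Int Int) :
    (nbrs.foldl (fun (qi : List Int × PySem.Dict Int Int) n =>
        let ind' := qi.2.modify n 0 (· - 1)
        if ind'.getD n 0 == 0 then (qi.1 ++ [n], ind') else (qi.1, ind')) (q, I)).1
      = q ++ nbrs.filter (fun n => I.getD n 0 == 1) := by
  rw [pvKahnStepPair _ hnd q I]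

theorem pvKahnStepQ2 (nbrs : List Int) (hnd : nbrs.Nodup) (q : List Int)
    (I : PySem.Dict Int Int) :
    (nbrs.foldl (fun (qi : List Int × PySem.Dict Int Int) n =>
        let ind' := qi.2.modify n 0 (· - 1)
        if ind'.getD n 0 == 0 then (qi.1 ++ [n], ind') else (qi.1, ind')) (q, I)).2
      = nbrs.foldl (fun (J : PySem.Dict Int Int) n => J.modify n 0 (· - 1)) I := by
  rw [pvKahnStepPair _ hnd q I]

theorem pvKahn_step (graph : PySem.Dict Int (PySem.Set Int)) (fuel : Nat)
    (current : Int) (rest : List Int) (indeg : PySem.Dict Int Int) (printed : Int) :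
    pvKahn graph (fuel + 1) (current :: rest) indeg printed =
      pvKahn graph fuel
        ((graph.getD current PySem.Set.empty).foldl
          (fun (qi : List Int × PySem.Dict Int Int) n =>
            let ind' := qi.2.modify n 0 (· - 1)
            if ind'.getD n 0 == 0 then (qi.1 ++ [n], ind') else (qi.1, ind')) (rest, indeg)).1
        ((graph.getD current PySem.Set.empty).foldl
          (fun (qi : List Int × PySem.Dict Int Int) n =>
            let ind' := qi.2.modify n 0 (· - 1)
            if ind'.getD n 0 == 0 then (qi.1 ++ [n], ind') else (qi.1, ind')) (rest, indeg)).2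
        (printed + 1) := rfl

-- splitting a filter length at one element of a nodup list
theorem pvFilterSplit (K : List Int) (hnd : K.Nodup) (P Q : Int → Bool) (x : Int)
    (hx : x ∈ K) (hQx : Q x = false) (hagree : ∀ d ∈ K, d ≠ x → P d = Q d) :
    ((K.filter P).length : Int) = (K.filter Q).length + (if P x then 1 else 0) := by
  induction K with
  | nil => exact absurd hx (by simp)
  | cons k t ih =>
    have hk : k ∉ t := (List.nodup_cons.1 hnd).1
    have htnd : t.Nodup := (List.nodup_cons.1 hnd).2
    by_cases hkx : k = x
    · subst hkx
      have hft : t.filter P = t.filter Q := by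
        apply List.filter_congr
        intro d hd
        exact hagree d (List.mem_cons_of_mem _ hd) (fun h => hk (h ▸ hd))
      rw [List.filter_cons, List.filter_cons, hft, hQx]
      by_cases hP : P k
      · rw [if_pos hP, hP]; simp
      · rw [if_neg (by simpa using hP)]
        simp only [Bool.false_eq_true, if_false]
        rw [if_neg (by simpa using hP)]
        simp
    · have hxt : x ∈ t := by
        rcases List.mem_cons.1 hx with h | h
        · exact absurd h.symm hkx
        · exact h
      have hPQ : P k = Q k := hagree k (List.mem_cons_self) hkx
      have iht := ih htnd hxt (fun d hd hdx => hagree d (List.mem_cons_of_mem _ hd) hdx)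
      rw [List.filter_cons, List.filter_cons, hPQ]
      by_cases hQ : Q k
      · rw [if_pos hQ, if_pos hQ]
        simp only [List.length_cons]
        push_cast
        omega
      · rw [if_neg (by simpa using hQ), if_neg (by simpa using hQ)]
        exact iht

set_option maxHeartbeats 1600000 in
theorem pvKahnMain (g : List (List Int)) :
    ∀ (fuel : Nat) (queue done : List Int) (indeg : PySem.Dict Int Int),
    (done ++ queue).Nodup →
    (∀ c ∈ done ++ queue, c ∈ pvK g) →
    (∀ c, indeg.getD c 0 =
      (((pvK g).filter (fun d => decide (c ∈ pvOut g d ∧ d ∉ done))).length : Int)) →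
    (∀ c ∈ pvK g, indeg.getD c 0 = 0 → c ∈ done ++ queue) →
    (∀ c ∈ done ++ queue, pvAcc g c) →
    (∀ c ∈ done ++ queue, ∀ d, pvE g d c → d ∈ done) →
    ((pvK g).length ≤ fuel + done.length) →
    ∃ dF : List Int,
      pvKahn (pvBuildGI g (pvBoundsA g).items).1 fuel queue indeg (done.length : Int)
        = (dF.length : Int) ∧
      dF.Nodup ∧ (∀ c ∈ dF, c ∈ pvK g ∧ pvAcc g c) ∧
      (∀ c ∈ pvK g, (∀ d, pvE g d c → d ∈ dF) → c ∈ dF) := by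
  have hKnd : (pvK g).Nodup := pvBoundsA_nodup g
  have final : ∀ (done : List Int) (indeg : PySem.Dict Int Int),
      (done ++ ([] : List Int)).Nodup →
      (∀ c ∈ done ++ ([] : List Int), c ∈ pvK g) →
      (∀ c, indeg.getD c 0 =
        (((pvK g).filter (fun d => decide (c ∈ pvOut g d ∧ d ∉ done))).length : Int)) →
      (∀ c ∈ pvK g, indeg.getD c 0 = 0 → c ∈ done ++ ([] : List Int)) →
      (∀ c ∈ done ++ ([] : List Int), pvAcc g c) →
      (done.Nodup ∧ (∀ c ∈ done, c ∈ pvK g ∧ pvAcc g c) ∧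
        (∀ c ∈ pvK g, (∀ d, pvE g d c → d ∈ done) → c ∈ done)) := by
    intro done indeg hnd hmem hb hc hd
    refine ⟨by simpa using hnd, fun c hcd => ⟨hmem c (by simp [hcd]), hd c (by simp [hcd])⟩, ?_⟩
    intro c hcK hall
    have hfe : (pvK g).filter (fun d => decide (c ∈ pvOut g d ∧ d ∉ done)) = [] := by
      apply List.filter_eq_nil_iff.2
      intro d hdK
      simp only [decide_eq_true_eq, not_and, not_not]
      intro hout
      exact hall d ⟨hdK, hout⟩
    have hz := hb c
    rw [hfe] at hz
    simp only [List.length_nil, Nat.cast_zero] at hz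
    simpa using hc c hcK hz
  have toolong : ∀ (done queue : List Int), (done ++ queue).Nodup →
      (∀ c ∈ done ++ queue, c ∈ pvK g) → (done ++ queue).length ≤ (pvK g).length := by
    intro done queue hnd hmem
    have h1 : (done ++ queue).toFinset ⊆ (pvK g).toFinset := fun x hx =>
      List.mem_toFinset.2 (hmem x (List.mem_toFinset.1 hx))
    have h2 := Finset.card_le_card h1
    rw [List.toFinset_card_of_nodup hnd] at h2
    exact le_trans h2 (List.toFinset_card_le _)
  intro fuel
  induction fuel with
  | zero =>
    intro queue done indeg hnd hmem hb hc hd he hfuel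
    cases queue with
    | nil =>
      obtain ⟨f1, f2, f3⟩ := final done indeg hnd hmem hb hc hd
      exact ⟨done, rfl, f1, f2, f3⟩
    | cons q qs =>
      exfalso
      have := toolong done (q :: qs) hnd hmem
      simp only [List.length_append, List.length_cons] at this
      omega
  | succ n ih =>
    intro queue done indeg hnd hmem hb hc hd he hfuel
    cases queue with
    | nil =>
      obtain ⟨f1, f2, f3⟩ := final done indeg hnd hmem hb hc hd
      exact ⟨done, rfl, f1, f2, f3⟩
    | cons current rest =>
      have hcurK : current ∈ pvK g := hmem current (by simp)
      have hgr : (pvBuildGI g (pvBoundsA g).items).1.getD current PySem.Set.empty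
          = PySem.Set.ofList (pvOut g current) := by
        rw [pvGraph_getD, if_pos hcurK]
      have hofnd : (PySem.Set.ofList (pvOut g current)).Nodup := PySem.Set.nodup_ofList _
      have hdisj := List.disjoint_of_nodup_append hnd
      have hcnd : current ∉ done := fun h => hdisj h (List.mem_cons_self)
      -- one step of the loop
      rw [pvKahn_step, hgr, pvKahnStepQ1 _ hofnd, pvKahnStepQ2 _ hofnd]
      set hz := (PySem.Set.ofList (pvOut g current)).filter (fun m => indeg.getD m 0 == 1)
        with hhz
      set Idec := (PySem.Set.ofList (pvOut g current)).foldl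
          (fun (J : PySem.Dict Int Int) m => J.modify m 0 (· - 1)) indeg with hIdec
      have hzmem : ∀ m, m ∈ hz ↔ m ∈ pvOut g current ∧ indeg.getD m 0 = 1 := by
        intro m
        rw [hhz, List.mem_filter, PySem.Set.mem_ofList]
        simp [beq_iff_eq]
      have hinK : ∀ m ∈ hz, m ∈ pvK g := fun m hm =>
        pvOut_sub_K g current m hcurK ((hzmem m).1 hm).1
      have hIdec_getD : ∀ c, Idec.getD c 0
          = indeg.getD c 0 - (if c ∈ pvOut g current then 1 else 0) := by
        intro c
        rw [hIdec, pvDecFold _ hofnd]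
        congr 1
        by_cases hco : c ∈ pvOut g current
        · rw [if_pos ((PySem.Set.mem_ofList _ _).2 hco), if_pos hco]
        · rw [if_neg (fun h => hco ((PySem.Set.mem_ofList _ _).1 h)), if_neg hco]
      have hb' : ∀ c, Idec.getD c 0 =
          (((pvK g).filter
            (fun d => decide (c ∈ pvOut g d ∧ d ∉ done ++ [current]))).length : Int) := by
        intro c
        have hsplit := pvFilterSplit (pvK g) hKnd
          (fun d => decide (c ∈ pvOut g d ∧ d ∉ done))
          (fun d => decide (c ∈ pvOut g d ∧ d ∉ done ++ [current])) current hcurK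
          (by rw [decide_eq_false_iff_not]; rintro ⟨-, h2⟩; exact h2 (by simp)) (by
            intro d _ hdx
            rw [decide_eq_decide]
            constructor
            · rintro ⟨h1, h2⟩
              exact ⟨h1, by simp [List.mem_append, h2, hdx]⟩
            · rintro ⟨h1, h2⟩
              exact ⟨h1, fun hh => h2 (by simp [List.mem_append, hh])⟩)
        rw [hIdec_getD c, hb c]
        by_cases hco : c ∈ pvOut g current
        · rw [if_pos hco]
          rw [if_pos (show decide (c ∈ pvOut g current ∧ current ∉ done) = true from by
            rw [decide_eq_true_eq]; exact ⟨hco, hcnd⟩)] at hsplit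
          omega
        · rw [if_neg hco]
          rw [if_neg (show ¬ decide (c ∈ pvOut g current ∧ current ∉ done) = true from by
            rw [decide_eq_true_eq]; rintro ⟨h1, -⟩; exact hco h1)] at hsplit
          omega
      have hznotold : ∀ m ∈ hz, m ∉ done ++ current :: rest := by
        intro m hm hmold
        have h1 : ∀ d, pvE g d m → d ∈ done := he m hmold
        have hfe : (pvK g).filter (fun d => decide (m ∈ pvOut g d ∧ d ∉ done)) = [] := by
          apply List.filter_eq_nil_iff.2
          intro d hdK
          simp only [decide_eq_true_eq, not_and, not_not]
          intro hout
          exact h1 d ⟨hdK, hout⟩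
        have hz0 := hb m
        rw [hfe] at hz0
        simp only [List.length_nil, Nat.cast_zero] at hz0
        have h2 := ((hzmem m).1 hm).2
        rw [hz0] at h2
        exact absurd h2 (by norm_num)
      have hzrest : ∀ m ∈ hz, m ∉ rest := by
        intro m hm hmr
        exact hznotold m hm (by simp [hmr])
      have hznd : hz.Nodup := List.Nodup.filter _ hofnd
      have hAccDone' : ∀ x ∈ done ++ [current], pvAcc g x := by
        intro x hx
        rcases List.mem_append.1 hx with h | h
        · exact hd x (by simp [h])
        · rw [List.mem_singleton.1 h]
          exact hd current (by simp)
      have hclosed_hz : ∀ m ∈ hz, ∀ d, pvE g d m → d ∈ done ++ [current] := by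
        intro m hm d hE
        have h0 : Idec.getD m 0 = 0 := by
          rw [hIdec_getD m, ((hzmem m).1 hm).2, if_pos ((hzmem m).1 hm).1]
          norm_num
        have := hb' m
        rw [h0] at this
        have hfe : (pvK g).filter
            (fun d => decide (m ∈ pvOut g d ∧ d ∉ done ++ [current])) = [] := by
          have hlen0 : ((pvK g).filter
              (fun d => decide (m ∈ pvOut g d ∧ d ∉ done ++ [current]))).length = 0 := by
            omega
          exact List.eq_nil_of_length_eq_zero hlen0
        by_contra hdnot
        have hdmem : d ∈ (pvK g).filter
            (fun d => decide (m ∈ pvOut g d ∧ d ∉ done ++ [current])) :=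
          List.mem_filter.2 ⟨hE.1, by simp only [decide_eq_true_eq]; exact ⟨hE.2, hdnot⟩⟩
        rw [hfe] at hdmem
        exact List.not_mem_nil hdmem
      -- apply the induction hypothesis
      obtain ⟨dF, hval, hFnd, hFmem, hFcl⟩ := ih (rest ++ hz) (done ++ [current]) Idec
        (by
          have hre : (done ++ [current]) ++ (rest ++ hz) = (done ++ current :: rest) ++ hz := by
            simp
          rw [hre]
          exact List.Nodup.append hnd hznd (fun x hx hhx => hznotold x hhx hx))
        (by
          intro c hcm
          rcases List.mem_append.1 hcm with h | h
          · rcases List.mem_append.1 h with h1 | h1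
            · exact hmem c (by simp [h1])
            · rw [List.mem_singleton.1 h1]; exact hcurK
          · rcases List.mem_append.1 h with h1 | h1
            · exact hmem c (by simp [h1])
            · exact hinK c h1)
        hb'
        (by
          intro c hcK h0
          rw [hIdec_getD c] at h0
          by_cases hco : c ∈ pvOut g current
          · rw [if_pos hco] at h0
            have : c ∈ hz := (hzmem c).2 ⟨hco, by omega⟩
            simp [this]
          · rw [if_neg hco] at h0
            have := hc c hcK (by omega)
            rcases List.mem_append.1 this with h | h
            · simp [h]
            · rcases List.mem_cons.1 h with h1 | h1
              · simp [h1]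
              · simp [h1])
        (by
          intro c hcm
          rcases List.mem_append.1 hcm with h | h
          · exact hAccDone' c h
          · rcases List.mem_append.1 h with h1 | h1
            · exact hd c (by simp [h1])
            · exact pvAcc.mk c (fun d hE => by
                have := hclosed_hz c h1 d hE
                exact hAccDone' d this))
        (by
          intro c hcm d hE
          rcases List.mem_append.1 hcm with h | h
          · rcases List.mem_append.1 h with h1 | h1
            · exact List.mem_append.2 (Or.inl (he c (by simp [h1]) d hE))
            · rw [List.mem_singleton.1 h1] at hE
              exact List.mem_append.2 (Or.inl (he current (by simp) d hE))
          · rcases List.mem_append.1 h with h1 | h1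
            · exact List.mem_append.2 (Or.inl (he c (by simp [h1]) d hE))
            · exact hclosed_hz c h1 d hE)
        (by
          simp only [List.length_append, List.length_cons, List.length_nil] at hfuel ⊢
          omega)
      refine ⟨dF, ?_, hFnd, hFmem, hFcl⟩
      rw [← hval]
      congr 1
      simp only [List.length_append, List.length_cons, List.length_nil]
      push_cast
      ring

-- a nodup sub-list of K of full length exhausts K; all-Acc transfer
theorem pvFull (K dF : List Int) (hK : K.Nodup) (hd : dF.Nodup) (hsub : ∀ c ∈ dF, c ∈ K) :
    (dF.length = K.length ↔ ∀ c ∈ K, c ∈ dF) := by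
  have h1 : dF.toFinset ⊆ K.toFinset := fun x hx =>
    List.mem_toFinset.2 (hsub x (List.mem_toFinset.1 hx))
  constructor
  · intro hlen c hc
    have h2 : K.toFinset.card ≤ dF.toFinset.card := by
      rw [List.toFinset_card_of_nodup hd, List.toFinset_card_of_nodup hK, hlen]
    have h3 := Finset.eq_of_subset_of_card_le h1 h2
    exact List.mem_toFinset.1 (h3 ▸ List.mem_toFinset.2 hc)
  · intro hall
    have h3 : dF.toFinset = K.toFinset :=
      Finset.Subset.antisymm h1 (fun x hx => List.mem_toFinset.2 (hall x (List.mem_toFinset.1 hx)))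
    rw [← List.toFinset_card_of_nodup hd, ← List.toFinset_card_of_nodup hK, h3]

theorem pvAccFull (g : List (List Int)) (dF : List Int)
    (hAcc : ∀ c ∈ dF, c ∈ pvK g ∧ pvAcc g c)
    (hcl : ∀ c ∈ pvK g, (∀ d, pvE g d c → d ∈ dF) → c ∈ dF) :
    (∀ c ∈ pvK g, c ∈ dF) ↔ (∀ c ∈ pvK g, pvAcc g c) := by
  constructor
  · intro hfull c hc
    exact (hAcc c (hfull c hc)).2
  · intro hall
    have key : ∀ c, pvAcc g c → c ∈ pvK g → c ∈ dF := by
      intro c hacc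
      induction hacc with
      | mk c h ihc =>
        intro hcK
        exact hcl c hcK (fun d hE => ihc d hE hE.1)
    exact fun c hc => key c (hall c hc) hc

theorem pvSetLen (l : List Int) : PySem.Set.len l = (l.length : Int) := by
  simp [PySem.Set.len]

theorem pvA_iff (g : List (List Int)) :
    isPrintable g = true ↔ ∀ c ∈ pvK g, pvAcc g c := by
  have hKnd : (pvK g).Nodup := pvBoundsA_nodup g
  have hof : PySem.Set.ofList (pvBoundsA g).keys = (pvBoundsA g).keys :=
    PySem.Set.ofList_eq_self_of_nodup _ hKnd
  show ((pvKahn (pvBuildGI g (pvBoundsA g).items).1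
      (PySem.Set.ofList (pvBoundsA g).keys).length
      ((PySem.Set.ofList (pvBoundsA g).keys).filter
        (fun c => (pvBuildGI g (pvBoundsA g).items).2.getD c 0 == 0))
      (pvBuildGI g (pvBoundsA g).items).2 0
    == PySem.Set.len (PySem.Set.ofList (pvBoundsA g).keys)) = true) ↔ _
  rw [hof]
  have hq : ∀ c, c ∈ (pvBoundsA g).keys.filter
      (fun c => (pvBuildGI g (pvBoundsA g).items).2.getD c 0 == 0)
      ↔ c ∈ pvK g ∧ (pvBuildGI g (pvBoundsA g).items).2.getD c 0 = 0 := by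
    intro c
    rw [List.mem_filter]
    simp [pvK, beq_iff_eq]
  obtain ⟨dF, hval, hFnd, hFmem, hFcl⟩ := pvKahnMain g (pvBoundsA g).keys.length
    ((pvBoundsA g).keys.filter (fun c => (pvBuildGI g (pvBoundsA g).items).2.getD c 0 == 0))
    [] (pvBuildGI g (pvBoundsA g).items).2
    (by simpa using List.Nodup.filter _ hKnd)
    (by intro c hc; exact ((hq c).1 (by simpa using hc)).1)
    (by
      intro c
      rw [pvIndeg_getD g c]
      have hfc : (pvK g).filter (fun d => decide (c ∈ pvOut g d))
          = (pvK g).filter (fun d => decide (c ∈ pvOut g d ∧ d ∉ ([] : List Int))) := by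
        apply List.filter_congr
        intro d _
        rw [decide_eq_decide]
        simp
      rw [hfc])
    (by
      intro c hcK h0
      simp only [List.nil_append]
      exact (hq c).2 ⟨hcK, h0⟩)
    (by
      intro c hc
      have h0 := ((hq c).1 (by simpa using hc)).2
      rw [pvIndeg_getD g c] at h0
      have hfe : (pvK g).filter (fun d => decide (c ∈ pvOut g d)) = [] :=
        List.eq_nil_of_length_eq_zero (by omega)
      refine pvAcc.mk c (fun d hE => ?_)
      exfalso
      have hdm : d ∈ (pvK g).filter (fun d => decide (c ∈ pvOut g d)) :=
        List.mem_filter.2 ⟨hE.1, by simp only [decide_eq_true_eq]; exact hE.2⟩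
      rw [hfe] at hdm
      exact List.not_mem_nil hdm)
    (by
      intro c hc d hE
      have h0 := ((hq c).1 (by simpa using hc)).2
      rw [pvIndeg_getD g c] at h0
      have hfe : (pvK g).filter (fun d => decide (c ∈ pvOut g d)) = [] :=
        List.eq_nil_of_length_eq_zero (by omega)
      exfalso
      have hdm : d ∈ (pvK g).filter (fun d => decide (c ∈ pvOut g d)) :=
        List.mem_filter.2 ⟨hE.1, by simp only [decide_eq_true_eq]; exact hE.2⟩
      rw [hfe] at hdm
      exact List.not_mem_nil hdm)
    (by simp only [List.length_nil, Nat.add_zero]; exact Nat.le_refl _)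
  simp only [List.length_nil, Nat.cast_zero] at hval
  rw [hval, pvSetLen, beq_iff_eq, Int.natCast_inj]
  have hfull := pvFull (pvK g) dF hKnd hFnd (fun c hc => (hFmem c hc).1)
  have haccf := pvAccFull g dF hFmem hFcl
  rw [show (pvBoundsA g).keys.length = (pvK g).length from rfl, hfull, haccf]

-- elimination loop -------------------------------------------------------------

theorem pvBlocked_eq_flat (g : List (List Int)) (items : List (Int × (Int × Int × Int × Int)))
    (erased : PySem.Set Int) :
    pvBlocked g items erased = items.foldl (fun bl p =>
      if PySem.Set.contains erased p.1 then bl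
      else (pvRegion g p.2).foldl (fun bl e =>
        if e != p.1 then PySem.Set.add bl e else bl) bl) PySem.Set.empty := by
  unfold pvBlocked pvRegion
  congr 1
  funext bl p
  cases hc : PySem.Set.contains erased p.1
  · simp only [Bool.false_eq_true, if_false]
    rw [pvFoldlFlatMap]
    simp only [List.foldl_map]
  · simp

theorem pvAddIfFold_mem (d : Int) (cs : List Int) :
    ∀ (bl : PySem.Set Int) (x : Int),
    x ∈ cs.foldl (fun bl e => if e != d then PySem.Set.add bl e else bl) bl
      ↔ x ∈ bl ∨ (x ∈ cs ∧ x ≠ d) := by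
  induction cs with
  | nil => simp
  | cons e t ih =>
    intro bl x
    rw [List.foldl_cons]
    by_cases he : e = d
    · rw [if_neg (by simpa using he), ih]
      subst he
      simp only [List.mem_cons]
      constructor
      · rintro (h | ⟨h1, h2⟩)
        · exact Or.inl h
        · exact Or.inr ⟨Or.inr h1, h2⟩
      · rintro (h | ⟨h1 | h1, h2⟩)
        · exact Or.inl h
        · exact absurd h1 h2
        · exact Or.inr ⟨h1, h2⟩
    · rw [if_pos (by simpa using he), ih]
      rw [PySem.Set.mem_add]
      simp only [List.mem_cons]
      constructor
      · rintro ((h | h) | ⟨h1, h2⟩)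
        · exact Or.inl h
        · exact Or.inr ⟨Or.inl h, h ▸ he⟩
        · exact Or.inr ⟨Or.inr h1, h2⟩
      · rintro (h | ⟨h1 | h1, h2⟩)
        · exact Or.inl (Or.inl h)
        · exact Or.inl (Or.inr h1)
        · exact Or.inr ⟨h1, h2⟩

theorem pvBlockedFold_mem (g : List (List Int)) (erased : PySem.Set Int) :
    ∀ (items : List (Int × (Int × Int × Int × Int))) (bl : PySem.Set Int) (x : Int),
    x ∈ items.foldl (fun bl p =>
      if PySem.Set.contains erased p.1 then bl
      else (pvRegion g p.2).foldl (fun bl e =>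
        if e != p.1 then PySem.Set.add bl e else bl) bl) bl
      ↔ x ∈ bl ∨ ∃ p ∈ items, ¬(PySem.Set.contains erased p.1 = true)
          ∧ x ∈ pvRegion g p.2 ∧ x ≠ p.1 := by
  intro items
  induction items with
  | nil => simp
  | cons p t ih =>
    intro bl x
    rw [List.foldl_cons]
    cases hc : PySem.Set.contains erased p.1
    · simp only [Bool.false_eq_true, if_false]
      rw [ih, pvAddIfFold_mem]
      simp only [List.mem_cons]
      constructor
      · rintro ((h | ⟨h1, h2⟩) | ⟨q, hq, hq2⟩)
        · exact Or.inl h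
        · exact Or.inr ⟨p, Or.inl rfl, by intro h; rw [hc] at h; exact Bool.false_ne_true h, h1, h2⟩
        · exact Or.inr ⟨q, Or.inr hq, hq2⟩
      · rintro (h | ⟨q, hq | hq, hq2⟩)
        · exact Or.inl (Or.inl h)
        · exact Or.inl (Or.inr ⟨(hq ▸ hq2).2.1, (hq ▸ hq2).2.2⟩)
        · exact Or.inr ⟨q, hq, hq2⟩
    · simp only [if_true]
      rw [ih]
      simp only [List.mem_cons]
      constructor
      · rintro (h | ⟨q, hq, hq2⟩)
        · exact Or.inl h
        · exact Or.inr ⟨q, Or.inr hq, hq2⟩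
      · rintro (h | ⟨q, hq | hq, hq2⟩)
        · exact Or.inl h
        · exact absurd hc (by rw [← hq]; exact hq2.1)
        · exact Or.inr ⟨q, hq, hq2⟩

theorem pvBlocked_mem (g : List (List Int)) (erased : PySem.Set Int) (e : Int) :
    e ∈ pvBlocked g (pvBoundsA g).items erased ↔
      ∃ d, pvE g d e ∧ d ∉ erased := by
  rw [pvBlocked_eq_flat, pvBlockedFold_mem]
  simp only [PySem.Set.empty, List.not_mem_nil, false_or]
  constructor
  · rintro ⟨p, hp, hc, hreg, hne⟩
    · refine ⟨p.1, ⟨?_, ?_⟩, ?_⟩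
      · rw [pvMem_K]
        have : p.1 ∈ (pvBoundsA g).items.map Prod.fst := List.mem_map.2 ⟨p, hp, rfl⟩
        have hkk : pvK g = (pvBoundsA g).items.map Prod.fst := by simp [pvK, PySem.Dict.keys]
        rw [← pvMem_K, hkk]
        exact this
      · unfold pvOut
        have hbb : (pvBoundsA g).getD p.1 (0, 0, 0, 0) = p.2 := by
          rcases p with ⟨k, v⟩
          exact PySem.Dict.getD_of_mem_items _ hp (pvBoundsA_nodup g) _
        rw [hbb]
        exact List.mem_filter.2 ⟨hreg, by simpa using hne⟩
      · intro hmem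
        exact hc ((PySem.Set.contains_iff _ _).2 hmem)
  · rintro ⟨d, ⟨hdK, hout⟩, hder⟩
    have hkk : pvK g = (pvBoundsA g).items.map Prod.fst := by simp [pvK, PySem.Dict.keys]
    obtain ⟨p, hp, hp1⟩ := List.mem_map.1 (by rw [hkk] at hdK; exact hdK)
    refine ⟨p, hp, ?_, ?_, ?_⟩
    · intro hct
      exact hder (hp1 ▸ (PySem.Set.contains_iff _ _).1 hct)
    · have hbb : (pvBoundsA g).getD p.1 (0, 0, 0, 0) = p.2 := by
        rcases p with ⟨k, v⟩
        exact PySem.Dict.getD_of_mem_items _ hp (pvBoundsA_nodup g) _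
      have hreg : e ∈ pvRegion g ((pvBoundsA g).getD d (0, 0, 0, 0)) :=
        (List.mem_filter.1 hout).1
      rw [hp1] at hbb
      rw [← hbb]
      exact hreg
    · rw [hp1]
      exact pvOut_ne g d e hout

theorem pvSizeK (g : List (List Int)) : (pvBoundsA g).size = (pvK g).length := by
  simp [pvK, PySem.Dict.size, PySem.Dict.keys]

theorem pvElimMain (g : List (List Int)) :
    ∀ (fuel : Nat) (erased : PySem.Set Int), erased.Nodup →
    (∀ c ∈ erased, c ∈ pvK g ∧ pvAcc g c) →
    ((pvK g).length < fuel + erased.length) →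
    (pvElim g (pvBoundsA g) fuel erased = true ↔ ∀ c ∈ pvK g, pvAcc g c) := by
  have hKnd : (pvK g).Nodup := pvBoundsA_nodup g
  intro fuel
  induction fuel with
  | zero =>
    intro erased hnd hprops hlt
    exfalso
    have hsub : ∀ c ∈ erased, c ∈ pvK g := fun c hc => (hprops c hc).1
    have h1 : erased.toFinset ⊆ (pvK g).toFinset := fun x hx =>
      List.mem_toFinset.2 (hsub x (List.mem_toFinset.1 hx))
    have h2 := Finset.card_le_card h1
    rw [List.toFinset_card_of_nodup hnd] at h2
    have h3 := le_trans h2 (List.toFinset_card_le _)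
    omega
  | succ n ih =>
    intro erased hnd hprops hlt
    show (if ((pvBoundsA g).keys.filter (fun c => !(PySem.Set.contains erased c)
          && !(PySem.Set.contains (pvBlocked g (pvBoundsA g).items erased) c))).isEmpty
        then PySem.Set.len erased == ((pvBoundsA g).size : Int)
        else pvElim g (pvBoundsA g) n (PySem.Set.update erased
          ((pvBoundsA g).keys.filter (fun c => !(PySem.Set.contains erased c)
            && !(PySem.Set.contains (pvBlocked g (pvBoundsA g).items erased) c))))) = true
      ↔ ∀ c ∈ pvK g, pvAcc g c
    set newly := (pvBoundsA g).keys.filter (fun c => !(PySem.Set.contains erased c)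
      && !(PySem.Set.contains (pvBlocked g (pvBoundsA g).items erased) c)) with hnew
    have hnewmem : ∀ c, c ∈ newly ↔
        c ∈ pvK g ∧ c ∉ erased ∧ ∀ d, pvE g d c → d ∈ erased := by
      intro c
      rw [hnew, List.mem_filter]
      have h1 : (!(PySem.Set.contains erased c)
            && !(PySem.Set.contains (pvBlocked g (pvBoundsA g).items erased) c)) = true
          ↔ c ∉ erased ∧ c ∉ pvBlocked g (pvBoundsA g).items erased := by
        rw [Bool.and_eq_true, Bool.not_eq_true', Bool.not_eq_true']
        constructor
        · rintro ⟨ha, hb⟩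
          constructor
          · intro hm; rw [(PySem.Set.contains_iff _ _).2 hm] at ha; exact Bool.noConfusion ha
          · intro hm; rw [(PySem.Set.contains_iff _ _).2 hm] at hb; exact Bool.noConfusion hb
        · rintro ⟨ha, hb⟩
          constructor
          · cases hcc : PySem.Set.contains erased c with
            | false => rfl
            | true => exact absurd ((PySem.Set.contains_iff _ _).1 hcc) ha
          · cases hcc : PySem.Set.contains (pvBlocked g (pvBoundsA g).items erased) c with
            | false => rfl
            | true => exact absurd ((PySem.Set.contains_iff _ _).1 hcc) hb
      rw [h1, pvBlocked_mem]
      constructor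
      · rintro ⟨hk, hne, hnb⟩
        refine ⟨hk, hne, fun d hE => ?_⟩
        by_contra hdd
        exact hnb ⟨d, hE, hdd⟩
      · rintro ⟨hk, hne, hall⟩
        exact ⟨hk, hne, fun ⟨d, hE, hdd⟩ => hdd (hall d hE)⟩
    by_cases hne : newly.isEmpty
    · rw [if_pos hne]
      have hnil : newly = [] := by
        cases hh : newly with
        | nil => rfl
        | cons a t => rw [hh] at hne; simp at hne
      have hclosed : ∀ c ∈ pvK g, (∀ d, pvE g d c → d ∈ erased) → c ∈ erased := by
        intro c hc hin
        by_contra hnc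
        have : c ∈ newly := (hnewmem c).2 ⟨hc, hnc, hin⟩
        rw [hnil] at this
        exact List.not_mem_nil this
      have hsub2 : ∀ c ∈ erased, c ∈ pvK g := fun c hc => (hprops c hc).1
      have hfull := pvFull (pvK g) erased hKnd hnd hsub2
      have haccf := pvAccFull g erased hprops (fun c hc h => hclosed c hc h)
      rw [pvSetLen, beq_iff_eq, pvSizeK, Int.natCast_inj, hfull, haccf]
    · rw [if_neg hne]
      have hnempty : newly ≠ [] := fun h => hne (by rw [h]; rfl)
      have hnnd : newly.Nodup := List.Nodup.filter _ hKnd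
      have hdisj2 : ∀ x ∈ newly, x ∉ erased := fun x hx => ((hnewmem x).1 hx).2.1
      have hupd : PySem.Set.update erased newly = erased ++ newly :=
        PySem.Set.update_eq_append_of_disjoint _ _ hnnd hdisj2
      apply ih
      · rw [hupd]
        exact List.Nodup.append hnd hnnd (fun x hx hhx => hdisj2 x hhx hx)
      · intro c hc
        rw [hupd] at hc
        rcases List.mem_append.1 hc with h | h
        · exact hprops c h
        · have hn := (hnewmem c).1 h
          exact ⟨hn.1, pvAcc.mk c (fun d hE => (hprops d (hn.2.2 d hE)).2)⟩
      · rw [hupd, List.length_append]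
        have h1 : 1 ≤ newly.length := by
          cases hh : newly with
          | nil => exact absurd hh hnempty
          | cons a t => simp
        omega

theorem pvB_iff (g : List (List Int)) :
    isPrintable_alt g = true ↔ ∀ c ∈ pvK g, pvAcc g c := by
  show pvElim g (pvBoundsB g) ((pvBoundsB g).size + 1) PySem.Set.empty = true ↔ _
  rw [pvBoundsB_eq]
  apply pvElimMain g ((pvBoundsA g).size + 1) PySem.Set.empty List.nodup_nil
    (fun c hc => absurd hc List.not_mem_nil)
  rw [pvSizeK]
  simp

-- ===== VERDICT (by name: the statement is the Claim_ definition above) =====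
theorem isPrintable_spec : Claim_equal_isPrintable := by
  intro g _ _
  unfold Spec_isPrintable
  rw [Bool.eq_iff_iff, pvA_iff, pvB_iff]
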